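-- pv_equiv track=rewrite | github.com/TommyPujol06/jutge | codewars/2015/chihuahua_age.py | human_age
-- ===== SOURCE A (Python) =====
-- def human_age(age):
--     h_age = 0
--     while age != 0:
--         if age > 2:
--             h_age += 4
--         else:
--             h_age += 10
--         age -= 1
--     return h_age
-- ===== SOURCE B (Python) =====
-- def human_age(age):
--     # closed form: ages 0 and 1 contribute 10 each, every year beyond 2 adds 4
--     if age <= 1:
--         return 10 * age
--     return 4 * age + 12
-- ===== Notes on version B (the rewrite author's own statement) =====
-- stated objective: faster
-- what changed: Replaced the O(age) decrement loop by a closed-form arithmetic formula (10*age for age<=1, else 4*age+12).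
import Mathlib
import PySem

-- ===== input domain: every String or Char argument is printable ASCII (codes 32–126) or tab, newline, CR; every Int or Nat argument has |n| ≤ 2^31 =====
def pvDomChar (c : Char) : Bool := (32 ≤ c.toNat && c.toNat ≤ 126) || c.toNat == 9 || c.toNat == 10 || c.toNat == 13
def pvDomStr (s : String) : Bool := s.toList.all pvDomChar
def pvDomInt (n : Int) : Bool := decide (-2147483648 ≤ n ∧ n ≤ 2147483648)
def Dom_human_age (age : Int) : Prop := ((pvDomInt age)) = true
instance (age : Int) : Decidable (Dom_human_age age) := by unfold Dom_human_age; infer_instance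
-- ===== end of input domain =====

-- B replaces A's O(age) decrement loop by a closed-form formula (objective: faster, asymptotic).


-- ===== PORT A =====
-- the while-loop: each iteration looks at the current age, adds 4 or 10, decrements;
-- transcribed as structural recursion on age.toNat (exact for age ≥ 0, i.e. on Pre_)
def human_age_loop : Nat → Int → Int
  | 0, h_age => h_age
  | n + 1, h_age => human_age_loop n (h_age + (if ((n : Int) + 1) > 2 then 4 else 10))

def human_age (age : Int) : Int := human_age_loop age.toNat 0

-- ===== PORT B =====
def human_age_alt (age : Int) : Int := if age ≤ 1 then 10 * age else 4 * age + 12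

-- ===== PRECONDITION & SPEC =====
-- Pre_ excludes negative age, on which A's 'while age != 0: age -= 1' never terminates.
def Pre_human_age (age : Int) : Prop := 0 ≤ age
instance (age : Int) : Decidable (Pre_human_age age) := by unfold Pre_human_age; infer_instance
def pvWitness_human_age : Int := (5)

def Spec_human_age (age : Int) (out : Int) : Prop := out = human_age_alt age
instance (age : Int) (out : Int) : Decidable (Spec_human_age age out) := by unfold Spec_human_age; infer_instance

-- ===== CLAIM (what is proved, stated in full; the proofs are below) =====
def Claim_equal_human_age : Prop := ∀ (age : Int), Dom_human_age age → Pre_human_age age → Spec_human_age age (human_age age)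

-- ===== LEMMAS AND PROOFS =====
theorem human_age_loop_closed (n : Nat) (h : Int) :
    human_age_loop n h = h + (if (n : Int) ≤ 1 then 10 * n else 4 * n + 12) := by
  induction n generalizing h with
  | zero => simp [human_age_loop]
  | succ k ih =>
    simp only [human_age_loop, ih]
    rcases Nat.lt_or_ge k 2 with hk | hk
    · interval_cases k <;> simp [human_age_loop] <;> ring
    · have : (2 : Int) ≤ (k : Int) := by exact_mod_cast hk
      push_cast
      split_ifs <;> omega

-- ===== VERDICT (by name: the statement is the Claim_ definition above) =====
theorem human_age_spec : Claim_equal_human_age := by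
  intro age _ hpre
  unfold Spec_human_age human_age human_age_alt
  rw [human_age_loop_closed]
  have h : ((age.toNat : Int)) = age := Int.toNat_of_nonneg hpre
  split_ifs <;> omega
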